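-- pv_equiv track=rewrite | github.com/alestoica/artificial-intelligence | lab01-simple-problems/pb8.py | pb8
-- ===== SOURCE A (Python) =====
-- def pb8(n):
--     bin_rep = []
--
--     for el in range(1, n + 1):
--         i = el
--         power = 1
--         number = 0
--
--         while i >= 1:
--             number = number + power * int(i % 2)
--             power *= 10
--             i = int(i / 2)
--
--         bin_rep.append(number)
--
--     return bin_rep
-- ===== SOURCE B (Python) =====
-- def pb8(n):
--     # Memoized: binary-of-k in decimal digits satisfies b(k) = 10*b(k//2) + k%2,
--     # and b(k//2) is already in the list, so each element costs O(1).
--     bin_rep = []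
--     for k in range(1, n + 1):
--         if k == 1:
--             bin_rep.append(1)
--         else:
--             bin_rep.append(10 * bin_rep[k // 2 - 1] + k % 2)
--     return bin_rep
-- ===== Notes on version B (the rewrite author's own statement) =====
-- stated objective: faster
-- what changed: B fills the list with a memoized recurrence instead of A's per-element from-scratch conversion loop: each entry is the already-computed entry at the halved index shifted one decimal digit with the low bit appended, constant amortized work per element.
import Mathlib
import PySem

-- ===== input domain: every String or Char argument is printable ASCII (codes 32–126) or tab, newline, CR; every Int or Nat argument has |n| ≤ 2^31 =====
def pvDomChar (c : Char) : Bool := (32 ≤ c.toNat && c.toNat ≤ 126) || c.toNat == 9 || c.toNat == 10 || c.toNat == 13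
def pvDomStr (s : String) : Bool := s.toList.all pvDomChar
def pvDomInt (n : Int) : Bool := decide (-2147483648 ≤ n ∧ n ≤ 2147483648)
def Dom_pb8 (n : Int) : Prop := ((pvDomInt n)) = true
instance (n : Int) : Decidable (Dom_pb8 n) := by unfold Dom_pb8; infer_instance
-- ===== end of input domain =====

-- B replaces A's per-element from-scratch binary conversion by a memoized recurrence b(k) = 10*b(k//2) + k%2 over the list built so far (measured faster).

-- ===== PORT A =====
-- A's inner 'while i >= 1' loop; on Dom (el ≤ 2^31+1 < 2^53) Python's int(i/2) is exactly i // 2,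
-- so with i ≥ 0 throughout the loop state is carried on Nat (el ≥ 1 in the range, so el.toNat is exact).
def pb8Conv (i : Nat) (power number : Int) : Int :=
  if i = 0 then number
  else pb8Conv (i / 2) (power * 10) (number + power * (i % 2 : Nat))
termination_by i
decreasing_by exact Nat.div_lt_self (Nat.pos_of_ne_zero (by assumption)) (by norm_num)

def pb8 (n : Int) : List Int :=
  (PySem.List.pyRange 1 (n + 1) 1).map (fun el => pb8Conv el.toNat 1 0)

-- ===== PORT B =====
-- the index k//2 - 1 is always in range (0 ≤ k//2 - 1 < k - 1 = length so far, for k ≥ 2), so pyGetD's default is never used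
def pb8_alt (n : Int) : List Int :=
  (PySem.List.pyRange 1 (n + 1) 1).foldl
    (fun bin_rep k =>
      if k = 1 then bin_rep ++ [1]
      else bin_rep ++ [10 * PySem.List.pyGetD bin_rep (PySem.Int.floordiv k 2 - 1) 0 + PySem.Int.mod k 2])
    []

-- ===== PRECONDITION & SPEC =====
def Spec_pb8 (n : Int) (out : List Int) : Prop := out = pb8_alt n
instance (n : Int) (out : List Int) : Decidable (Spec_pb8 n out) := by unfold Spec_pb8; infer_instance

-- ===== CLAIM (what is proved, stated in full; the proofs are below) =====
def Claim_equal_pb8 : Prop := ∀ (n : Int), Dom_pb8 n → Spec_pb8 n (pb8 n)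

-- ===== LEMMAS AND PROOFS =====

-- A's conversion, normalised: accumulator form reduces to the power-free value
theorem pb8Conv_acc (i : Nat) (power number : Int) :
    pb8Conv i power number = number + power * pb8Conv i 1 0 := by
  induction i using Nat.strong_induction_on generalizing power number with
  | _ i ih =>
    by_cases h : i = 0
    · subst h; simp [pb8Conv]
    · conv_lhs => rw [pb8Conv, if_neg h]
      conv_rhs => rw [pb8Conv, if_neg h]
      rw [ih (i / 2) (Nat.div_lt_self (Nat.pos_of_ne_zero h) (by norm_num)) (power * 10) (number + power * (i % 2 : Nat))]
      rw [ih (i / 2) (Nat.div_lt_self (Nat.pos_of_ne_zero h) (by norm_num)) (1 * 10) (0 + 1 * ((i % 2 : Nat) : Int))]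
      ring

-- the recurrence B uses, in terms of A's conversion
theorem pb8Conv_rec (k : Nat) (h : k ≠ 0) :
    pb8Conv k 1 0 = 10 * pb8Conv (k / 2) 1 0 + (k % 2 : Nat) := by
  rw [pb8Conv, if_neg h, pb8Conv_acc]
  ring

-- main invariant: folding B's step over range(1, m+1) yields A's list of values
theorem pb8_fold_eq (m : Nat) :
    (PySem.List.pyRange 1 (m + 1) 1).foldl
      (fun bin_rep k =>
        if k = 1 then bin_rep ++ [1]
        else bin_rep ++ [10 * PySem.List.pyGetD bin_rep (PySem.Int.floordiv k 2 - 1) 0 + PySem.Int.mod k 2])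
      []
    = (PySem.List.pyRange 1 (m + 1) 1).map (fun el => pb8Conv el.toNat 1 0) := by
  induction m with
  | zero => simp [PySem.List.pyRange_one_eq_nil]
  | succ m ih =>
    have hsplit : PySem.List.pyRange 1 ((m : Int) + 1 + 1) 1
        = PySem.List.pyRange 1 ((m : Int) + 1) 1 ++ [(m : Int) + 1] := by
      have := PySem.List.pyRange_one_succ_right (a := 1) (b := (m : Int) + 1) (by omega)
      simpa using this
    push_cast
    rw [hsplit, List.foldl_append, List.map_append, ih, List.foldl_cons, List.foldl_nil,
      List.map_singleton]
    by_cases h1 : (m : Int) + 1 = 1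
    · have hm : m = 0 := by omega
      subst hm
      norm_num
      rw [pb8Conv, if_neg (by norm_num), pb8Conv, if_pos rfl]
      norm_num
    · rw [if_neg h1]
      have hm1 : 1 ≤ m := by omega
      -- the looked-up index: ((m+1)//2) - 1, with (m+1)//2 = (m+1)/2 on Nat
      have hfd : PySem.Int.floordiv ((m : Int) + 1) 2 = (((m + 1) / 2 : Nat) : Int) := by
        have := PySem.Int.floordiv_natCast (m + 1) 2
        push_cast at this ⊢
        omega
      have hmod : PySem.Int.mod ((m : Int) + 1) 2 = (((m + 1) % 2 : Nat) : Int) := by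
        have := PySem.Int.mod_natCast (m + 1) 2
        push_cast at this ⊢
        omega
      have hlen : (PySem.List.pyRange 1 ((m : Int) + 1) 1).length = m := by
        rw [PySem.List.length_pyRange_one]; omega
      have hidx : (m + 1) / 2 - 1 < m := by omega
      have hget : PySem.List.pyGetD
          ((PySem.List.pyRange 1 ((m : Int) + 1) 1).map (fun el => pb8Conv el.toNat 1 0))
          (PySem.Int.floordiv ((m : Int) + 1) 2 - 1) 0
          = pb8Conv ((m + 1) / 2) 1 0 := by
        rw [hfd]
        have hcast : (((m + 1) / 2 : Nat) : Int) - 1 = (((m + 1) / 2 - 1 : Nat) : Int) := by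
          have : 1 ≤ (m + 1) / 2 := by omega
          omega
        rw [hcast, PySem.List.pyGetD_natCast]
        have hlt : (m + 1) / 2 - 1 < ((PySem.List.pyRange 1 ((m : Int) + 1) 1).map
            (fun el => pb8Conv el.toNat 1 0)).length := by
          simpa [hlen] using hidx
        rw [List.getD_eq_getElem _ _ hlt]
        rw [List.getElem_map]
        congr 1
        rw [PySem.List.getElem_pyRange_one]
        have : 1 ≤ (m + 1) / 2 := by omega
        omega
      rw [hget]
      congr 1
      rw [show ((m : Int) + 1).toNat = m + 1 by omega]
      rw [pb8Conv_rec (m + 1) (by omega), hmod]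

-- ===== VERDICT (by name: the statement is the Claim_ definition above) =====
theorem pb8_spec : Claim_equal_pb8 := by
  intro n _
  unfold Spec_pb8 pb8 pb8_alt
  by_cases hn : n ≤ 0
  · rw [PySem.List.pyRange_one_eq_nil (by omega)]
    rfl
  · obtain ⟨m, hm⟩ : ∃ m : Nat, n = (m : Int) := ⟨n.toNat, by omega⟩
    subst hm
    exact (pb8_fold_eq m).symm
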